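-- pv_equiv track=rewrite | github.com/sdave0/multi-agent-cx-memory | backend/evals/run.py | check_efficiency
-- ===== SOURCE A (Python) =====
-- from typing import List, Dict, Any
--
-- def check_efficiency(tool_call_history: List[Dict[str, Any]]) -> tuple[bool, str]:
--     # Step Count Limit (e.g., 10)
--     if len(tool_call_history) > 10:
--         return False, f"Inefficient: {len(tool_call_history)} steps taken (limit 10)"
--
--     # Stutter Detection
--     if len(tool_call_history) >= 3:
--         for i in range(len(tool_call_history) - 2):
--             t1 = tool_call_history[i]
--             t2 = tool_call_history[i+1]
--             t3 = tool_call_history[i+2]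
--
--             if t1.get("tool") == t2.get("tool") == t3.get("tool"):
--                 if t1.get("params") == t2.get("params") == t3.get("params"):
--                     return False, f"Infinite Looping: '{t1.get('tool')}' looped 3 times identically."
--
--     return True, ""
-- ===== SOURCE B (Python) =====
-- def check_efficiency(tool_call_history):
--     if len(tool_call_history) > 10:
--         return False, f"Inefficient: {len(tool_call_history)} steps taken (limit 10)"
--
--     # Single pass: count the length of the current run of consecutive equal calls.
--     prev = None
--     count = 0
--     for t in tool_call_history:
--         key = (t.get("tool"), t.get("params"))
--         if count > 0 and key == prev:
--             count += 1
--         else: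
--             prev = key
--             count = 1
--         if count >= 3:
--             return False, f"Infinite Looping: '{key[0]}' looped 3 times identically."
--
--     return True, ""
-- ===== Notes on version B (the rewrite author's own statement) =====
-- stated objective: simpler
-- what changed: Replaced the index-based triple-window scan (three dict lookups per window) with a single pass over the entries keeping a run counter of consecutive equal (tool, params) keys that fires at 3.
import Mathlib
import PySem

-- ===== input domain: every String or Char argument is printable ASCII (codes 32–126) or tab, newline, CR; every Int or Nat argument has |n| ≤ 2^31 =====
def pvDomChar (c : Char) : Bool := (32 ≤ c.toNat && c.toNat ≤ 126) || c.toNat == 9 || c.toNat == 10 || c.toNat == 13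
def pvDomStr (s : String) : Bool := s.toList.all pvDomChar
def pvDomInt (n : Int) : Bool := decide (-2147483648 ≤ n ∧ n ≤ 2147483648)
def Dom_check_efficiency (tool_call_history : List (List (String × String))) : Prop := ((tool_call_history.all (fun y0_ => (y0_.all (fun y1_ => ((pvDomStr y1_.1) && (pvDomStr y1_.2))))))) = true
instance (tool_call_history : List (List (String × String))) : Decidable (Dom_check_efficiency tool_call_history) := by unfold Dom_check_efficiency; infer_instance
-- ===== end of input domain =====

-- B replaces A's index-based triple-window scan with a single pass keeping a run counter
-- of consecutive equal (tool, params) keys (objective: simpler).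

-- shared helpers: d.get(k) (first match, none = absent) and Python's str() of an Optional[str]
def pvGet (t : List (String × String)) (k : String) : Option String :=
  PySem.Dict.get? ⟨t⟩ k

def pvStr (o : Option String) : String :=
  match o with
  | none => "None"
  | some s => s

def pvLoopMsg (o : Option String) : String :=
  "Infinite Looping: '" ++ pvStr o ++ "' looped 3 times identically."

-- ===== PORT A =====
-- the for-loop over range(len-2) with early return, index i; indices i, i+1, i+2 are in
-- range whenever the loop body runs, so getD is exact here
def pvLoopA (h : List (List (String × String))) (i : Nat) : Bool × String :=
  if _hi : i < h.length - 2 then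
    let t1 := h.getD i []
    let t2 := h.getD (i+1) []
    let t3 := h.getD (i+2) []
    if pvGet t1 "tool" = pvGet t2 "tool" ∧ pvGet t2 "tool" = pvGet t3 "tool" then
      if pvGet t1 "params" = pvGet t2 "params" ∧ pvGet t2 "params" = pvGet t3 "params" then
        (false, pvLoopMsg (pvGet t1 "tool"))
      else pvLoopA h (i+1)
    else pvLoopA h (i+1)
  else (true, "")
  termination_by h.length - i

def check_efficiency (tool_call_history : List (List (String × String))) : Bool × String :=
  if tool_call_history.length > 10 then
    (false, "Inefficient: " ++ PySem.Int.toStr (tool_call_history.length : Int) ++ " steps taken (limit 10)")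
  else if tool_call_history.length ≥ 3 then
    pvLoopA tool_call_history 0
  else (true, "")

-- ===== PORT B =====
-- single pass: prev = key of the current run (none initially), count = its length so far
def pvLoopB : List (List (String × String)) → Option (Option String × Option String) → Nat → Bool × String
  | [], _, _ => (true, "")
  | t :: rest, prev, count =>
    let k : Option String × Option String := (pvGet t "tool", pvGet t "params")
    let s : Option (Option String × Option String) × Nat :=
      if count > 0 ∧ some k = prev then (prev, count + 1) else (some k, 1)
    if s.2 ≥ 3 then (false, pvLoopMsg k.1)
    else pvLoopB rest s.1 s.2

def check_efficiency_alt (tool_call_history : List (List (String × String))) : Bool × String :=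
  if tool_call_history.length > 10 then
    (false, "Inefficient: " ++ PySem.Int.toStr (tool_call_history.length : Int) ++ " steps taken (limit 10)")
  else pvLoopB tool_call_history none 0

-- ===== PRECONDITION & SPEC =====
def Spec_check_efficiency (tool_call_history : List (List (String × String))) (out : Bool × String) : Prop := out = check_efficiency_alt tool_call_history
instance (tool_call_history : List (List (String × String))) (out : Bool × String) : Decidable (Spec_check_efficiency tool_call_history out) := by unfold Spec_check_efficiency; infer_instance

-- ===== CLAIM (what is proved, stated in full; the proofs are below) =====
def Claim_equal_check_efficiency : Prop := ∀ (tool_call_history : List (List (String × String))), Dom_check_efficiency tool_call_history → Spec_check_efficiency tool_call_history (check_efficiency tool_call_history)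

-- ===== LEMMAS AND PROOFS =====

-- the (tool, params) key of one entry
def pvKey (t : List (String × String)) : Option String × Option String :=
  (pvGet t "tool", pvGet t "params")

-- common characterisation: first window of three consecutive equal keys
def pvTripleScan : List (Option String × Option String) → Bool × String
  | a :: b :: c :: rest => if a = b ∧ b = c then (false, pvLoopMsg a.1) else pvTripleScan (b :: c :: rest)
  | _ => (true, "")

lemma pvTripleScan_short (ks : List (Option String × Option String)) (h : ks.length ≤ 2) :
    pvTripleScan ks = (true, "") := by
  match ks with
  | [] => rfl
  | [_] => rfl
  | [_, _] => rfl
  | _ :: _ :: _ :: _ => simp at h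

lemma pvTripleScan_ne (a k : Option String × Option String) (ks : List (Option String × Option String))
    (hne : a ≠ k) : pvTripleScan (a :: k :: ks) = pvTripleScan (k :: ks) := by
  match ks with
  | [] => rfl
  | c :: cs =>
    show (if a = k ∧ k = c then _ else _) = _
    rw [if_neg (by exact fun hc => hne hc.1)]

lemma pvLoopA_eq (d : Nat) : ∀ (h : List (List (String × String))) (i : Nat),
    h.length - 2 - i ≤ d → pvLoopA h i = pvTripleScan ((h.map pvKey).drop i) := by
  induction d with
  | zero =>
    intro h i hd
    rw [pvLoopA]
    rw [dif_neg (by omega)]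
    rw [pvTripleScan_short _ (by simp; omega)]
  | succ d ih =>
    intro h i hd
    rw [pvLoopA]
    by_cases hi : i < h.length - 2
    · rw [dif_pos hi]
      have h1 : i < h.length := by omega
      have h2 : i + 1 < h.length := by omega
      have h3 : i + 2 < h.length := by omega
      have hdrop : (h.map pvKey).drop i =
          pvKey h[i] :: pvKey h[i+1] :: pvKey h[i+2] :: (h.map pvKey).drop (i+3) := by
        rw [List.drop_eq_getElem_cons (by simpa using h1), List.drop_eq_getElem_cons (by simpa using h2),
            List.drop_eq_getElem_cons (by simpa using h3)]
        simp
      have hg1 : h.getD i [] = h[i] := List.getD_eq_getElem h [] h1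
      have hg2 : h.getD (i+1) [] = h[i+1] := List.getD_eq_getElem h [] h2
      have hg3 : h.getD (i+2) [] = h[i+2] := List.getD_eq_getElem h [] h3
      rw [hdrop]
      show (if _ then _ else _) = (if _ then _ else _)
      simp only [pvKey, Prod.mk.injEq, hg1, hg2, hg3]
      by_cases htool : pvGet h[i] "tool" = pvGet h[i+1] "tool" ∧ pvGet h[i+1] "tool" = pvGet h[i+2] "tool"
      · rw [if_pos htool]
        by_cases hpar : pvGet h[i] "params" = pvGet h[i+1] "params" ∧ pvGet h[i+1] "params" = pvGet h[i+2] "params"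
        · rw [if_pos hpar, if_pos ⟨⟨htool.1, hpar.1⟩, htool.2, hpar.2⟩]
        · rw [if_neg hpar, if_neg (by tauto)]
          rw [ih h (i+1) (by omega)]
          rw [List.drop_eq_getElem_cons (by simpa using h2), List.drop_eq_getElem_cons (by simpa using h3)]
          simp [pvKey]
        -- continue: same recursive call, tail starting at i+1
      · rw [if_neg htool, if_neg (by tauto)]
        rw [ih h (i+1) (by omega)]
        rw [List.drop_eq_getElem_cons (by simpa using h2), List.drop_eq_getElem_cons (by simpa using h3)]
        simp [pvKey]
    · rw [dif_neg hi]
      rw [pvTripleScan_short _ (by simp; omega)]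

lemma pvLoopB_cons (t : List (String × String)) (rest : List (List (String × String)))
    (prev : Option (Option String × Option String)) (count : Nat) :
    pvLoopB (t :: rest) prev count =
      (if (if count > 0 ∧ some ((pvGet t "tool", pvGet t "params") : Option String × Option String) = prev
            then (prev, count + 1) else (some ((pvGet t "tool", pvGet t "params") : Option String × Option String), 1)).2 ≥ 3
        then (false, pvLoopMsg (pvGet t "tool"))
        else pvLoopB rest
          (if count > 0 ∧ some ((pvGet t "tool", pvGet t "params") : Option String × Option String) = prev
            then (prev, count + 1) else (some ((pvGet t "tool", pvGet t "params") : Option String × Option String), 1)).1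
          (if count > 0 ∧ some ((pvGet t "tool", pvGet t "params") : Option String × Option String) = prev
            then (prev, count + 1) else (some ((pvGet t "tool", pvGet t "params") : Option String × Option String), 1)).2) := rfl

lemma pvLoopB_run : ∀ (rest : List (List (String × String))) (a : Option String × Option String),
    pvLoopB rest (some a) 1 = pvTripleScan (a :: rest.map pvKey) ∧
    pvLoopB rest (some a) 2 = pvTripleScan (a :: a :: rest.map pvKey) := by
  intro rest
  induction rest with
  | nil =>
    intro a
    exact ⟨rfl, rfl⟩
  | cons t rs ih =>
    intro a
    have hkey : ((pvGet t "tool", pvGet t "params") : Option String × Option String) = pvKey t := rfl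
    constructor
    · rw [pvLoopB_cons]
      by_cases hk : pvKey t = a
      · have hc : (1 : Nat) > 0 ∧ some ((pvGet t "tool", pvGet t "params") : Option String × Option String) = some a :=
          ⟨Nat.one_pos, by rw [hkey, hk]⟩
        rw [if_pos hc, if_neg (by norm_num)]
        show pvLoopB rs (some a) 2 = _
        simp only [List.map_cons]
        rw [← hk]
        exact (ih (pvKey t)).2
      · have hnc : ¬((1 : Nat) > 0 ∧ some ((pvGet t "tool", pvGet t "params") : Option String × Option String) = some a) :=
          fun hc => hk (by simpa [hkey] using hc.2)
        rw [if_neg hnc, if_neg (by norm_num)]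
        show pvLoopB rs (some (pvKey t)) 1 = _
        simp only [List.map_cons]
        rw [pvTripleScan_ne a (pvKey t) _ (fun h => hk h.symm)]
        exact (ih (pvKey t)).1
    · rw [pvLoopB_cons]
      by_cases hk : pvKey t = a
      · have hc : (2 : Nat) > 0 ∧ some ((pvGet t "tool", pvGet t "params") : Option String × Option String) = some a :=
          ⟨by omega, by rw [hkey, hk]⟩
        rw [if_pos hc, if_pos (by norm_num)]
        simp only [List.map_cons]
        rw [show pvTripleScan (a :: a :: pvKey t :: rs.map pvKey) = (false, pvLoopMsg a.1) from by
          show (if a = a ∧ a = pvKey t then _ else _) = _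
          rw [if_pos ⟨rfl, hk.symm⟩], ← hk]
        rfl
      · have hnc : ¬((2 : Nat) > 0 ∧ some ((pvGet t "tool", pvGet t "params") : Option String × Option String) = some a) :=
          fun hc => hk (by simpa [hkey] using hc.2)
        rw [if_neg hnc, if_neg (by norm_num)]
        show pvLoopB rs (some (pvKey t)) 1 = _
        simp only [List.map_cons]
        rw [show pvTripleScan (a :: a :: pvKey t :: rs.map pvKey) = pvTripleScan (a :: pvKey t :: rs.map pvKey) from by
              show (if a = a ∧ a = pvKey t then _ else _) = _
              rw [if_neg (fun hc => hk hc.2.symm)],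
            pvTripleScan_ne a (pvKey t) _ (fun h => hk h.symm)]
        exact (ih (pvKey t)).1

lemma pvLoopB_eq (h : List (List (String × String))) :
    pvLoopB h none 0 = pvTripleScan (h.map pvKey) := by
  match h with
  | [] => rfl
  | t :: rs =>
    rw [pvLoopB_cons, if_neg (by simp), if_neg (by omega)]
    simpa using (pvLoopB_run rs (pvKey t)).1

-- ===== VERDICT (by name: the statement is the Claim_ definition above) =====
theorem check_efficiency_spec : Claim_equal_check_efficiency := by
  intro h _
  show check_efficiency h = check_efficiency_alt h
  unfold check_efficiency check_efficiency_alt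
  by_cases hlen : h.length > 10
  · rw [if_pos hlen, if_pos hlen]
  · rw [if_neg hlen, if_neg hlen, pvLoopB_eq]
    by_cases h3 : h.length ≥ 3
    · rw [if_pos h3, pvLoopA_eq (h.length) h 0 (by omega)]
      simp
    · rw [if_neg h3, pvTripleScan_short _ (by simp; omega)]
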